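-- pv_equiv track=rewrite | github.com/Clh21/elderly-demo | indoor-positioning/indoor_positioning_server.py | count_slot_overlap
-- ===== SOURCE A (Python) =====
-- from typing import Dict, List, Optional, Tuple
--
-- def count_slot_overlap(
--     values: List[int],
--     reference_slots: set[int],
--     candidate_offset: int,
--     tolerance_slots: int,
-- ) -> int:
--     if not values or not reference_slots:
--         return 0
--
--     tolerance = max(0, int(tolerance_slots))
--     overlap = 0
--     for slot in values:
--         aligned_slot = slot - candidate_offset
--         matched = False
--         for delta in range(-tolerance, tolerance + 1):
--             if (aligned_slot + delta) in reference_slots: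
--                 matched = True
--                 break
--         if matched:
--             overlap += 1
--     return overlap
-- ===== SOURCE B (Python) =====
-- def count_slot_overlap(
--     values,
--     reference_slots,
--     candidate_offset,
--     tolerance_slots,
-- ):
--     # Interval test per value: a value matches iff some reference slot lies
--     # within [aligned - tol, aligned + tol]; scan the reference slots directly
--     # instead of probing every offset in the tolerance window.
--     tol = tolerance_slots if tolerance_slots > 0 else 0
--     count = 0
--     for slot in values:
--         aligned = slot - candidate_offset
--         if any(-tol <= aligned - r <= tol for r in reference_slots):
--             count += 1
--     return count
-- ===== Notes on version B (the rewrite author's own statement) =====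
-- stated objective: alternative
-- what changed: A probes every offset delta in [-tol, tol] against the reference set per value; B instead scans the reference slots once per value with a direct interval test |aligned - r| <= tol, eliminating the tolerance-window loop (and the early-return special cases); B trades dependence on the tolerance for dependence on the reference count.
import Mathlib
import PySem

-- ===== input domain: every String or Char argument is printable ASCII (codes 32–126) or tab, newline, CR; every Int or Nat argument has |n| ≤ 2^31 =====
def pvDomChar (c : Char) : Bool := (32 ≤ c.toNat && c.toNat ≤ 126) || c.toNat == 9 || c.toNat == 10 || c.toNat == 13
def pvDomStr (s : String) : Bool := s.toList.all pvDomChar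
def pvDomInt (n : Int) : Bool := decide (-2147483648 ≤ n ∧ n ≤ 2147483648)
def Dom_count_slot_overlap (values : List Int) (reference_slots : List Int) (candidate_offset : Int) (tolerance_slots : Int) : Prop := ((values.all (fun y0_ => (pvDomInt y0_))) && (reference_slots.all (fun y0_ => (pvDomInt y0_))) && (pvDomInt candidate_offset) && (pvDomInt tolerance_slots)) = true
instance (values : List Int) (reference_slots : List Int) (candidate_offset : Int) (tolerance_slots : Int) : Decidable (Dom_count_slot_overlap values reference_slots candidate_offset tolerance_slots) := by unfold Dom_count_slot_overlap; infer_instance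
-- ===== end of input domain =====

-- B replaces A's per-value tolerance-window probe loop with a direct interval test
-- against each reference slot (alternative decomposition, same result).


-- ===== PORT A =====
-- Literal transliteration of A: early return on empty inputs, tolerance = max(0, tol),
-- per value loop delta over range(-tolerance, tolerance+1) with break = List.any.
def count_slot_overlap (values : List Int) (reference_slots : List Int) (candidate_offset : Int) (tolerance_slots : Int) : Int :=
  if values = [] ∨ reference_slots = [] then 0
  else
    let tolerance := max 0 tolerance_slots
    values.foldl (fun overlap slot =>
      let aligned_slot := slot - candidate_offset
      let matched := (PySem.List.pyRange (-tolerance) (tolerance + 1) 1).any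
        (fun delta => reference_slots.contains (aligned_slot + delta))
      if matched then overlap + 1 else overlap) 0

-- ===== PORT B =====
-- Literal transliteration of B: per value, interval test against each reference slot.
def count_slot_overlap_alt (values : List Int) (reference_slots : List Int) (candidate_offset : Int) (tolerance_slots : Int) : Int :=
  let tol := if tolerance_slots > 0 then tolerance_slots else 0
  values.foldl (fun count slot =>
    let aligned := slot - candidate_offset
    if reference_slots.any (fun r => decide (-tol ≤ aligned - r) && decide (aligned - r ≤ tol))
    then count + 1 else count) 0

-- ===== PRECONDITION & SPEC =====
def Spec_count_slot_overlap (values : List Int) (reference_slots : List Int) (candidate_offset : Int) (tolerance_slots : Int) (out : Int) : Prop := out = count_slot_overlap_alt values reference_slots candidate_offset tolerance_slots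
instance (values : List Int) (reference_slots : List Int) (candidate_offset : Int) (tolerance_slots : Int) (out : Int) : Decidable (Spec_count_slot_overlap values reference_slots candidate_offset tolerance_slots out) := by unfold Spec_count_slot_overlap; infer_instance

-- ===== CLAIM (what is proved, stated in full; the proofs are below) =====
def Claim_equal_count_slot_overlap : Prop := ∀ (values : List Int) (reference_slots : List Int) (candidate_offset : Int) (tolerance_slots : Int), Dom_count_slot_overlap values reference_slots candidate_offset tolerance_slots → Spec_count_slot_overlap values reference_slots candidate_offset tolerance_slots (count_slot_overlap values reference_slots candidate_offset tolerance_slots)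

-- ===== LEMMAS AND PROOFS =====

-- The two per-value match tests agree.
lemma matched_eq (ref : List Int) (a t : Int) :
    (PySem.List.pyRange (-(max 0 t)) ((max 0 t) + 1) 1).any
        (fun delta => ref.contains (a + delta))
    = ref.any (fun r => decide (-(if t > (0:Int) then t else 0) ≤ a - r)
        && decide (a - r ≤ (if t > (0:Int) then t else 0))) := by
  have htol : (max 0 t) = (if t > (0:Int) then t else 0) := by
    split_ifs with h <;> omega
  rw [htol]
  set T : Int := if t > (0:Int) then t else 0 with hT
  rw [Bool.eq_iff_iff]
  simp only [List.any_eq_true, PySem.List.mem_pyRange_one, List.contains_iff_mem,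
    Bool.and_eq_true, decide_eq_true_eq]
  constructor
  · rintro ⟨d, ⟨h1, h2⟩, hmem⟩
    exact ⟨a + d, hmem, by omega, by omega⟩
  · rintro ⟨r, hmem, h1, h2⟩
    exact ⟨r - a, ⟨by omega, by omega⟩, by simpa using hmem⟩

lemma fold_eq (values ref : List Int) (off t : Int) (acc : Int) :
    values.foldl (fun overlap slot =>
      if (PySem.List.pyRange (-(max 0 t)) ((max 0 t) + 1) 1).any
        (fun delta => ref.contains (slot - off + delta))
      then overlap + 1 else overlap) acc
    = values.foldl (fun count slot =>
      if ref.any (fun r => decide (-(if t > (0:Int) then t else 0) ≤ slot - off - r)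
          && decide (slot - off - r ≤ (if t > (0:Int) then t else 0)))
      then count + 1 else count) acc := by
  induction values generalizing acc with
  | nil => rfl
  | cons x xs ih =>
    simp only [List.foldl_cons, matched_eq ref (x - off) t]
    exact ih _

-- ===== VERDICT (by name: the statement is the Claim_ definition above) =====
theorem count_slot_overlap_spec : Claim_equal_count_slot_overlap := by
  intro values ref off t _
  unfold Spec_count_slot_overlap count_slot_overlap count_slot_overlap_alt
  by_cases hv : values = [] ∨ ref = []
  · simp only [hv, if_true]
    rcases hv with h | h
    · subst h; rfl
    · subst h
      induction values with
      | nil => rfl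
      | cons x xs ih => simp
  · simp only [hv, if_false]
    exact fold_eq values ref off t 0
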